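-- pv_equiv track=rewrite | github.com/PauMayench/rat-hypertopia-detection | functions.py | nomesralla
-- ===== SOURCE A (Python) =====
-- from copy import deepcopy
--
-- def nomesralla(img2):
--     img = deepcopy(img2)
--     len2 = int(len(img) / 2)
--
--     for y in range(len(img[0])):
--         b = False
--         for a in range(len2):
--             x = (len2) - a - 1
--             if(not b and img[x][y] > 250):
--                 b = True
--             elif(b): img[x][y] = 0
--
--     for y in range(len(img[0])):
--         b = False
--         for a in range(len2):
--             x = (len2) + a
--             if(not b and img[x][y] > 250):
--                 b = True
--             elif(b): img[x][y] = 0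
--
--     return img
-- ===== SOURCE B (Python) =====
-- def nomesralla(img2):
--     len2 = len(img2) // 2
--     w = len(img2[0])
--     # boundary per column: largest top-half row with a bright pixel (nothing above 0 to zero otherwise),
--     # and smallest bottom-half row with one (nothing below 2*len2-1 to zero otherwise)
--     top = [next((x for x in range(len2 - 1, -1, -1) if img2[x][y] > 250), 0) for y in range(w)]
--     bot = [next((x for x in range(len2, 2 * len2) if img2[x][y] > 250), 2 * len2 - 1) for y in range(w)]
--     return [
--         [0 if y < w and ((x < len2 and x < top[y]) or (len2 <= x < 2 * len2 and x > bot[y])) else v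
--          for y, v in enumerate(row)]
--         for x, row in enumerate(img2)
--     ]
-- ===== Notes on version B (the rewrite author's own statement) =====
-- stated objective: alternative
-- what changed: A carries a boolean flag through in-place outward scans that zero as they go; B first computes, per column, the two boundary indices (largest bright row in the top half, smallest bright row in the bottom half) with next() over index ranges, then rebuilds the image in one comprehension pass zeroing strictly beyond those boundaries.
import Mathlib
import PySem

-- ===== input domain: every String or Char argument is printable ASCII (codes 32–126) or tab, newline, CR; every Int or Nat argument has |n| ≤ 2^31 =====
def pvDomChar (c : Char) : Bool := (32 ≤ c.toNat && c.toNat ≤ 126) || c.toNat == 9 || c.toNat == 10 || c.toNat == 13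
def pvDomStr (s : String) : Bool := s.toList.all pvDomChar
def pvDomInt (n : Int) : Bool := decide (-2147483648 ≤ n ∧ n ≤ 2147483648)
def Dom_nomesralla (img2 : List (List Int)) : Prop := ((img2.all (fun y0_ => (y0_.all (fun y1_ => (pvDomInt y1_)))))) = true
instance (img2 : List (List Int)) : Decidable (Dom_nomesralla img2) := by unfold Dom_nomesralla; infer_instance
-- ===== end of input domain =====

-- B replaces A's flag-carrying in-place outward scans by a detection pass (per-column boundary
-- indices via find?/next) followed by an index-based rebuild of the image; return values agree
-- (A also only returns a fresh deepcopy, so there is no observable mutation difference).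

-- shared low-level 2D accessors (img[x][y] read / write; in-range under Pre_)
def pvGet2 (img : List (List Int)) (x y : Nat) : Int := (img.getD x []).getD y 0
def pvSet2 (img : List (List Int)) (x y : Nat) (v : Int) : List (List Int) :=
  img.set x ((img.getD x []).set y v)

-- ===== PORT A =====
-- inner loop body of A's first (top-half) pass: x = len2 - a - 1
def pvStepTop (len2 y : Nat) (s : List (List Int) × Bool) (a : Nat) : List (List Int) × Bool :=
  let x := len2 - a - 1
  if s.2 = false ∧ pvGet2 s.1 x y > 250 then (s.1, true)
  else if s.2 = true then (pvSet2 s.1 x y 0, s.2)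
  else s

-- inner loop body of A's second (bottom-half) pass: x = len2 + a
def pvStepBot (len2 y : Nat) (s : List (List Int) × Bool) (a : Nat) : List (List Int) × Bool :=
  let x := len2 + a
  if s.2 = false ∧ pvGet2 s.1 x y > 250 then (s.1, true)
  else if s.2 = true then (pvSet2 s.1 x y 0, s.2)
  else s

def nomesralla (img2 : List (List Int)) : List (List Int) :=
  let img := img2                      -- deepcopy (pure values)
  let len2 := img.length / 2           -- int(len(img)/2)
  let w := (img.headD []).length       -- len(img[0]); Pre_ guarantees img ≠ []
  let img1 := (List.range w).foldl (fun im y =>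
      ((List.range len2).foldl (pvStepTop len2 y) (im, false)).1) img
  (List.range w).foldl (fun im y =>
      ((List.range len2).foldl (pvStepBot len2 y) (im, false)).1) img1

-- ===== PORT B =====
def nomesralla_alt (img2 : List (List Int)) : List (List Int) :=
  let len2 := img2.length / 2
  let w := (img2.headD []).length
  -- top[y] = next((x for x in range(len2-1,-1,-1) if img2[x][y] > 250), 0)
  let top : List Nat := (List.range w).map (fun y =>
      (((List.range len2).reverse).find? (fun x => decide (pvGet2 img2 x y > 250))).getD 0)
  -- bot[y] = next((x for x in range(len2, 2*len2) if img2[x][y] > 250), 2*len2-1)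
  let bot : List Nat := (List.range w).map (fun y =>
      ((List.range' len2 len2).find? (fun x => decide (pvGet2 img2 x y > 250))).getD (2 * len2 - 1))
  (PySem.List.enumerate img2).map (fun xr =>
    (PySem.List.enumerate xr.2).map (fun yv =>
      if yv.1 < (w : Int) ∧ ((xr.1 < (len2 : Int) ∧ xr.1 < ((top.getD yv.1.toNat 0 : Nat) : Int))
          ∨ ((len2 : Int) ≤ xr.1 ∧ xr.1 < 2 * (len2 : Int) ∧ ((bot.getD yv.1.toNat 0 : Nat) : Int) < xr.1))
      then 0 else yv.2))

-- ===== PRECONDITION & SPEC =====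
-- Pre_ excludes exactly the inputs on which A raises IndexError: the empty image (img[0]),
-- and images where some row among the scanned first 2*(len//2) rows is shorter than row 0.
def Pre_nomesralla (img2 : List (List Int)) : Prop :=
  img2 ≠ [] ∧ ∀ r ∈ img2.take (2 * (img2.length / 2)), (img2.headD []).length ≤ r.length
instance (img2 : List (List Int)) : Decidable (Pre_nomesralla img2) := by
  unfold Pre_nomesralla; infer_instance
def pvWitness_nomesralla : List (List Int) := [[300, 0], [1, 255]]

def Spec_nomesralla (img2 : List (List Int)) (out : List (List Int)) : Prop := out = nomesralla_alt img2
instance (img2 : List (List Int)) (out : List (List Int)) : Decidable (Spec_nomesralla img2 out) := by unfold Spec_nomesralla; infer_instance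

-- ===== CLAIM (what is proved, stated in full; the proofs are below) =====
def Claim_equal_nomesralla : Prop := ∀ (img2 : List (List Int)), Dom_nomesralla img2 → Pre_nomesralla img2 → Spec_nomesralla img2 (nomesralla img2)

-- ===== LEMMAS AND PROOFS =====

-- generic inner-loop step, parameterized by the row index actually visited
def pvStepG (y : Nat) (s : List (List Int) × Bool) (x : Nat) : List (List Int) × Bool :=
  if s.2 = false ∧ pvGet2 s.1 x y > 250 then (s.1, true)
  else if s.2 = true then (pvSet2 s.1 x y 0, s.2)
  else s

-- the set (ordered list) of row indices of column y that a flag-scan over xs zeroes,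
-- judged against the reference image img0
def pvZL (img0 : List (List Int)) (y : Nat) : Bool → List Nat → List Nat
  | _, [] => []
  | true, p :: t => p :: pvZL img0 y true t
  | false, p :: t => if pvGet2 img0 p y > 250 then pvZL img0 y true t else pvZL img0 y false t

def pvSetCol (y : Nat) (S : List Nat) (img : List (List Int)) : List (List Int) :=
  S.foldl (fun im p => pvSet2 im p y 0) img

theorem pvLen_set2 (img : List (List Int)) (x y : Nat) (v : Int) :
    (pvSet2 img x y v).length = img.length := by
  simp [pvSet2]

theorem pvRow_set2 (img : List (List Int)) (x y : Nat) (v : Int) (x' : Nat) :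
    ((pvSet2 img x y v).getD x' []).length = (img.getD x' []).length := by
  simp only [pvSet2, List.getD_eq_getElem?_getD, List.getElem?_set]
  by_cases h : x = x'
  · subst h
    by_cases hx : x < img.length
    · simp [hx]
    · simp [hx]
  · simp [h]
theorem pvGet2_set2_ne (img : List (List Int)) (x y : Nat) (v : Int) (x' y' : Nat)
    (h : x' ≠ x ∨ y' ≠ y) : pvGet2 (pvSet2 img x y v) x' y' = pvGet2 img x' y' := by
  by_cases hx : x = x'
  · subst hx
    have hy : y' ≠ y := by tauto
    simp only [pvGet2, pvSet2, List.getD_eq_getElem?_getD, List.getElem?_set]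
    by_cases hlt : x < img.length
    · simp [hlt, Ne.symm hy]
    · simp [hlt]
  · simp [pvGet2, pvSet2, List.getD_eq_getElem?_getD, hx]
theorem pvGet2_set2_self (img : List (List Int)) (x y : Nat) (v : Int)
    (hx : x < img.length) (hy : y < (img.getD x []).length) :
    pvGet2 (pvSet2 img x y v) x y = v := by
  have hy' : y < (img[x]).length := by
    simpa [List.getD_eq_getElem?_getD, List.getElem?_eq_getElem hx] using hy
  simp [pvGet2, pvSet2, List.getD_eq_getElem?_getD, hx, hy']
theorem pvLen_setCol (y : Nat) (S : List Nat) (img : List (List Int)) :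
    (pvSetCol y S img).length = img.length := by
  induction S generalizing img with
  | nil => rfl
  | cons p t ih => simp [pvSetCol, List.foldl_cons] at *; rw [ih]; exact pvLen_set2 ..

theorem pvRow_setCol (y : Nat) (S : List Nat) (img : List (List Int)) (x' : Nat) :
    ((pvSetCol y S img).getD x' []).length = ((img.getD x' []).length) := by
  induction S generalizing img with
  | nil => rfl
  | cons p t ih =>
      simp only [pvSetCol, List.foldl_cons] at *
      rw [ih]; exact pvRow_set2 ..

theorem pvGet2_setCol (y : Nat) (S : List Nat) (img : List (List Int)) (x' y' : Nat)
    (hv : ∀ p ∈ S, p < img.length ∧ y < (img.getD p []).length) :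
    pvGet2 (pvSetCol y S img) x' y' =
      if x' ∈ S ∧ y' = y then 0 else pvGet2 img x' y' := by
  induction S generalizing img with
  | nil => simp [pvSetCol]
  | cons p t ih =>
      simp only [pvSetCol, List.foldl_cons]
      rw [show (List.foldl (fun im p => pvSet2 im p y 0) (pvSet2 img p y 0) t)
            = pvSetCol y t (pvSet2 img p y 0) from rfl]
      rw [ih _ (by
        intro q hq
        refine ⟨by rw [pvLen_set2]; exact (hv q (List.mem_cons_of_mem _ hq)).1, ?_⟩
        rw [pvRow_set2]; exact (hv q (List.mem_cons_of_mem _ hq)).2)]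
      by_cases ht : x' ∈ t ∧ y' = y
      · simp [ht, List.mem_cons]
      · simp only [if_neg ht]
        by_cases hp : x' = p ∧ y' = y
        · obtain ⟨hp1, hp2⟩ := hp; subst hp1; subst hp2
          rw [pvGet2_set2_self _ _ _ _ (hv x' (List.mem_cons_self ..)).1
            (hv x' (List.mem_cons_self ..)).2]
          simp [List.mem_cons]
        · have hne : x' ≠ p ∨ y' ≠ y := by tauto
          rw [pvGet2_set2_ne _ _ _ _ _ _ hne]
          have : ¬ (x' ∈ p :: t ∧ y' = y) := by
            rintro ⟨hm, hy⟩
            rcases List.mem_cons.1 hm with h | h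
            · exact hp ⟨h, hy⟩
            · exact ht ⟨h, hy⟩
          rw [if_neg this]

theorem pvZL_subset (img0 : List (List Int)) (y : Nat) (b : Bool) (xs : List Nat) :
    ∀ q ∈ pvZL img0 y b xs, q ∈ xs := by
  induction xs generalizing b with
  | nil => cases b <;> simp [pvZL]
  | cons p t ih =>
      cases b with
      | true =>
          intro q hq
          rcases List.mem_cons.1 (by simpa [pvZL] using hq) with h | h
          · simp [h]
          · exact List.mem_cons_of_mem _ (ih true q h)
      | false =>
          intro q hq
          simp only [pvZL] at hq
          split at hq
          · exact List.mem_cons_of_mem _ (ih true q hq)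
          · exact List.mem_cons_of_mem _ (ih false q hq)

-- a flag-scan over distinct positions equals plainly zeroing the pvZL positions,
-- provided the current image agrees with the reference image on the positions to be read
theorem pvFold_eq_setCol (y : Nat) (xs : List Nat) (img img0 : List (List Int)) (b : Bool)
    (hnd : xs.Nodup) (hag : ∀ p ∈ xs, pvGet2 img p y = pvGet2 img0 p y) :
    (xs.foldl (pvStepG y) (img, b)).1 = pvSetCol y (pvZL img0 y b xs) img := by
  induction xs generalizing img b with
  | nil => cases b <;> simp [pvZL, pvSetCol]
  | cons p t ih =>
      have hnd' := (List.nodup_cons.1 hnd).2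
      have hpt := (List.nodup_cons.1 hnd).1
      cases b with
      | false =>
          by_cases hb : pvGet2 img p y > 250
          · have hb0 : pvGet2 img0 p y > 250 := by
              rw [← hag p (List.mem_cons_self ..)]; exact hb
            have hst : pvStepG y (img, false) p = (img, true) := by
              simp [pvStepG, hb]
            rw [List.foldl_cons, hst]
            simp only [pvZL, if_pos hb0]
            exact ih img true hnd' (fun q hq => hag q (List.mem_cons_of_mem _ hq))
          · have hb0 : ¬ pvGet2 img0 p y > 250 := by
              rw [← hag p (List.mem_cons_self ..)]; exact hb
            have hst : pvStepG y (img, false) p = (img, false) := by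
              simp [pvStepG, hb]
            rw [List.foldl_cons, hst]
            simp only [pvZL, if_neg hb0]
            exact ih img false hnd' (fun q hq => hag q (List.mem_cons_of_mem _ hq))
      | true =>
          have hst : pvStepG y (img, true) p = (pvSet2 img p y 0, true) := by
            simp [pvStepG]
          rw [List.foldl_cons, hst]
          simp only [pvZL, pvSetCol, List.foldl_cons]
          have hag' : ∀ q ∈ t, pvGet2 (pvSet2 img p y 0) q y = pvGet2 img0 q y := by
            intro q hq
            rw [pvGet2_set2_ne _ _ _ _ _ _ (Or.inl (by rintro rfl; exact hpt hq))]
            exact hag q (List.mem_cons_of_mem _ hq)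
          exact ih (pvSet2 img p y 0) true hnd' hag'

theorem pvZL_true (img0 : List (List Int)) (y : Nat) (xs : List Nat) :
    pvZL img0 y true xs = xs := by
  induction xs with
  | nil => rfl
  | cons p t ih => simp [pvZL, ih]

-- membership in the top-half zero set: some strictly higher index below len2 is bright
theorem pvMem_ZL_top (img0 : List (List Int)) (y : Nat) :
    ∀ (n x' : Nat), x' ∈ pvZL img0 y false ((List.range n).reverse) ↔
      ∃ t, x' < t ∧ t < n ∧ pvGet2 img0 t y > 250 := by
  intro n
  induction n with
  | zero => intro x'; simp [pvZL]
  | succ n ih =>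
      intro x'
      have hsp : ((List.range (n+1)).reverse) = n :: (List.range n).reverse := by
        rw [List.range_succ]; simp
      rw [hsp]
      by_cases hb : pvGet2 img0 n y > 250
      · simp only [pvZL, if_pos hb, pvZL_true]
        constructor
        · intro hm
          exact ⟨n, by simpa using List.mem_reverse.1 hm, Nat.lt_succ_self n, hb⟩
        · intro ⟨t, h1, h2, _⟩
          exact List.mem_reverse.2 (List.mem_range.2 (by omega))
      · simp only [pvZL, if_neg hb]
        rw [ih x']
        constructor
        · rintro ⟨t, h1, h2, h3⟩; exact ⟨t, h1, by omega, h3⟩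
        · rintro ⟨t, h1, h2, h3⟩
          refine ⟨t, h1, ?_, h3⟩
          rcases Nat.lt_succ_iff_lt_or_eq.1 h2 with h | rfl
          · exact h
          · exact absurd h3 hb

-- B's top boundary: x' is strictly below it iff some strictly higher index below n is bright
theorem pvTopVal (img0 : List (List Int)) (y : Nat) :
    ∀ (n x' : Nat),
      (x' < ((((List.range n).reverse).find? (fun x => decide (pvGet2 img0 x y > 250))).getD 0)) ↔
      ∃ t, x' < t ∧ t < n ∧ pvGet2 img0 t y > 250 := by
  intro n
  induction n with
  | zero => intro x'; simp
  | succ n ih =>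
      intro x'
      have hsp : ((List.range (n+1)).reverse) = n :: (List.range n).reverse := by
        rw [List.range_succ]; simp
      rw [hsp]
      by_cases hb : pvGet2 img0 n y > 250
      · simp only [List.find?_cons, hb, decide_true]
        simp only [Option.getD_some]
        constructor
        · intro h; exact ⟨n, h, Nat.lt_succ_self n, hb⟩
        · rintro ⟨t, h1, h2, _⟩; omega
      · simp only [List.find?_cons, hb, decide_false]
        rw [ih x']
        constructor
        · rintro ⟨t, h1, h2, h3⟩; exact ⟨t, h1, by omega, h3⟩
        · rintro ⟨t, h1, h2, h3⟩
          refine ⟨t, h1, ?_, h3⟩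
          rcases Nat.lt_succ_iff_lt_or_eq.1 h2 with h | rfl
          · exact h
          · exact absurd h3 hb

-- membership in the bottom-half zero set
theorem pvMem_ZL_bot (img0 : List (List Int)) (y : Nat) :
    ∀ (k s x' : Nat), x' ∈ pvZL img0 y false (List.range' s k) ↔
      ∃ t, s ≤ t ∧ t < x' ∧ x' < s + k ∧ pvGet2 img0 t y > 250 := by
  intro k
  induction k with
  | zero => intro s x'; simp [pvZL]; omega
  | succ k ih =>
      intro s x'
      rw [List.range'_succ]
      by_cases hb : pvGet2 img0 s y > 250
      · simp only [pvZL, if_pos hb, pvZL_true]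
        rw [List.mem_range']
        constructor
        · rintro ⟨i, hi, rfl⟩; exact ⟨s, le_refl s, by omega, by omega, hb⟩
        · rintro ⟨t, h1, h2, h3, _⟩; exact ⟨x' - (s+1), by omega, by omega⟩
      · simp only [pvZL, if_neg hb]
        rw [ih (s+1) x']
        constructor
        · rintro ⟨t, h1, h2, h3, h4⟩; exact ⟨t, by omega, h2, by omega, h4⟩
        · rintro ⟨t, h1, h2, h3, h4⟩
          refine ⟨t, ?_, h2, by omega, h4⟩
          rcases Nat.lt_or_ge s t with h | h
          · omega
          · have : t = s := by omega
            subst this; exact absurd h4 hb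

-- B's bottom boundary
theorem pvBotVal (img0 : List (List Int)) (y : Nat) :
    ∀ (k s x' : Nat),
      (x' < s + k ∧ (((List.range' s k).find? (fun x => decide (pvGet2 img0 x y > 250))).getD (s + k - 1)) < x') ↔
      ∃ t, s ≤ t ∧ t < x' ∧ x' < s + k ∧ pvGet2 img0 t y > 250 := by
  intro k
  induction k with
  | zero => intro s x'; simp; omega
  | succ k ih =>
      intro s x'
      rw [List.range'_succ]
      by_cases hb : pvGet2 img0 s y > 250
      · simp only [List.find?_cons, hb, decide_true, Option.getD_some]
        constructor
        · rintro ⟨h1, h2⟩; exact ⟨s, le_refl s, h2, h1, hb⟩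
        · rintro ⟨t, h1, h2, h3, _⟩; exact ⟨h3, by omega⟩
      · simp only [List.find?_cons, hb, decide_false]
        have hd : s + (k+1) - 1 = (s+1) + k - 1 := by omega
        rw [hd, show s + (k+1) = (s+1) + k from by omega]
        constructor
        · intro h
          obtain ⟨t, h1, h2, h3, h4⟩ := (ih (s+1) x').1 h
          exact ⟨t, by omega, h2, by omega, h4⟩
        · rintro ⟨t, h1, h2, h3, h4⟩
          apply (ih (s+1) x').2
          refine ⟨t, ?_, h2, by omega, h4⟩
          rcases Nat.lt_or_ge s t with h | h
          · omega
          · have : t = s := by omega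
            subst this; exact absurd h4 hb

-- outer pass characterization (generic in the visited positions xs, the base image,
-- and the reference image img0 the zero sets are judged against)
theorem pvPass_char (xs : List Nat) (img0 base : List (List Int))
    (hnd : xs.Nodup)
    (hag : ∀ p ∈ xs, ∀ y', pvGet2 base p y' = pvGet2 img0 p y')
    (hx : ∀ p ∈ xs, p < base.length)
    (w : Nat) (hw : ∀ p ∈ xs, ∀ y' < w, y' < (base.getD p []).length) :
    ∀ k, k ≤ w →
      (((List.range k).foldl (fun im y => (xs.foldl (pvStepG y) (im, false)).1) base).length = base.length) ∧
      (∀ x', (((List.range k).foldl (fun im y => (xs.foldl (pvStepG y) (im, false)).1) base).getD x' []).length = (base.getD x' []).length) ∧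
      (∀ x' y', pvGet2 ((List.range k).foldl (fun im y => (xs.foldl (pvStepG y) (im, false)).1) base) x' y' =
        if y' < k ∧ x' ∈ pvZL img0 y' false xs then 0 else pvGet2 base x' y') := by
  intro k
  induction k with
  | zero => intro _; exact ⟨rfl, fun _ => rfl, fun x' y' => by simp⟩
  | succ k ih =>
      intro hk
      obtain ⟨hl, hr, hc⟩ := ih (by omega)
      set imk := (List.range k).foldl (fun im y => (xs.foldl (pvStepG y) (im, false)).1) base with him
      have hstep : (List.range (k+1)).foldl (fun im y => (xs.foldl (pvStepG y) (im, false)).1) base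
          = (xs.foldl (pvStepG k) (imk, false)).1 := by
        rw [List.range_succ, List.foldl_append]; rfl
      have hagk : ∀ p ∈ xs, pvGet2 imk p k = pvGet2 img0 p k := by
        intro p hp
        rw [hc p k, if_neg (by rintro ⟨h, _⟩; omega)]
        exact hag p hp k
      have hfold : (xs.foldl (pvStepG k) (imk, false)).1
          = pvSetCol k (pvZL img0 k false xs) imk :=
        pvFold_eq_setCol k xs imk img0 false hnd hagk
      have hv : ∀ p ∈ pvZL img0 k false xs, p < imk.length ∧ k < (imk.getD p []).length := by
        intro p hp
        have hpx := pvZL_subset img0 k false xs p hp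
        refine ⟨by rw [hl]; exact hx p hpx, ?_⟩
        rw [hr p]; exact hw p hpx k (by omega)
      refine ⟨?_, ?_, ?_⟩
      · rw [hstep, hfold, pvLen_setCol]; exact hl
      · intro x'; rw [hstep, hfold, pvRow_setCol]; exact hr x'
      · intro x' y'
        rw [hstep, hfold, pvGet2_setCol _ _ _ _ _ hv, hc x' y']
        by_cases h1 : y' = k
        · subst h1
          by_cases h2 : x' ∈ pvZL img0 y' false xs
          · simp [h2]
          · simp [h2]
        · rw [if_neg (by rintro ⟨_, h⟩; exact h1 h)]
          have he : (y' < k ∧ x' ∈ pvZL img0 y' false xs) ↔ (y' < k + 1 ∧ x' ∈ pvZL img0 y' false xs) := by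
            constructor
            · rintro ⟨a, b⟩; exact ⟨by omega, b⟩
            · rintro ⟨a, b⟩; exact ⟨by omega, b⟩
          rw [if_congr he rfl rfl]

-- bridging A's literal loops to the generic pass
def pvXsTop (len2 : Nat) : List Nat := (List.range len2).map (fun a => len2 - a - 1)

theorem pvXsTop_eq (len2 : Nat) : pvXsTop len2 = (List.range len2).reverse := by
  rw [pvXsTop, show (List.range len2).reverse = ((List.range' 0 len2).reverse) from by
    rw [List.range_eq_range'], List.reverse_range']
  exact List.map_congr_left (fun a _ => by omega)

theorem pvXsBot_eq (len2 : Nat) :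
    (List.range len2).map (fun a => len2 + a) = List.range' len2 len2 := by
  rw [List.range'_eq_map_range]

theorem pvInnerTop_eq (len2 y : Nat) (s : List (List Int) × Bool) :
    (List.range len2).foldl (pvStepTop len2 y) s = ((List.range len2).reverse).foldl (pvStepG y) s := by
  rw [← pvXsTop_eq, pvXsTop, List.foldl_map]
  rfl

theorem pvInnerBot_eq (len2 y : Nat) (s : List (List Int) × Bool) :
    (List.range len2).foldl (pvStepBot len2 y) s = (List.range' len2 len2).foldl (pvStepG y) s := by
  rw [← pvXsBot_eq, List.foldl_map]
  rfl

theorem pvA_eq (img2 : List (List Int)) :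
    nomesralla img2 =
      (List.range ((img2.headD []).length)).foldl
        (fun im y => ((List.range' (img2.length / 2) (img2.length / 2)).foldl (pvStepG y) (im, false)).1)
        ((List.range ((img2.headD []).length)).foldl
          (fun im y => (((List.range (img2.length / 2)).reverse).foldl (pvStepG y) (im, false)).1) img2) := by
  simp only [nomesralla, pvInnerTop_eq, pvInnerBot_eq]

-- B's two boundary indices
def pvTop (img2 : List (List Int)) (y : Nat) : Nat :=
  (((List.range (img2.length / 2)).reverse).find? (fun x => decide (pvGet2 img2 x y > 250))).getD 0
def pvBot (img2 : List (List Int)) (y : Nat) : Nat :=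
  ((List.range' (img2.length / 2) (img2.length / 2)).find?
    (fun x => decide (pvGet2 img2 x y > 250))).getD (2 * (img2.length / 2) - 1)

theorem pvAlt_len (img2 : List (List Int)) : (nomesralla_alt img2).length = img2.length := by
  simp [nomesralla_alt]

theorem pvAlt_row (img2 : List (List Int)) (x' : Nat) :
    ((nomesralla_alt img2).getD x' []).length = (img2.getD x' []).length := by
  by_cases h : x' < img2.length
  · have h2 : x' < (nomesralla_alt img2).length := by rw [pvAlt_len]; exact h
    simp [nomesralla_alt, List.getD_eq_getElem?_getD, List.getElem?_eq_getElem h,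
      List.getElem?_map, PySem.List.getElem?_enumerate]
  · have h2 : ¬ x' < (nomesralla_alt img2).length := by rw [pvAlt_len]; exact h
    simp [List.getD_eq_getElem?_getD, List.getElem?_eq_none_iff.2 (by omega : (nomesralla_alt img2).length ≤ x'),
      List.getElem?_eq_none_iff.2 (by omega : img2.length ≤ x')]

theorem pvAlt_get (img2 : List (List Int)) (x' y' : Nat) :
    pvGet2 (nomesralla_alt img2) x' y' =
      if y' < (img2.headD []).length ∧
         ((x' < img2.length / 2 ∧ x' < pvTop img2 y') ∨
          (img2.length / 2 ≤ x' ∧ x' < 2 * (img2.length / 2) ∧ pvBot img2 y' < x')) then 0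
      else pvGet2 img2 x' y' := by
  by_cases hx : x' < img2.length
  · by_cases hy : y' < (img2[x']'hx).length
    · simp only [pvGet2, nomesralla_alt, pvTop, pvBot, List.headD_eq_head?_getD,
        List.getD_eq_getElem?_getD,
        List.getElem?_map, PySem.List.getElem?_enumerate, List.getElem?_eq_getElem hx,
        Option.map_some, Option.getD_some, List.getElem?_eq_getElem hy, zero_add,
        Int.toNat_natCast]
      by_cases hyw : y' < (img2.head?.getD []).length
      · have hyr : y' < (List.range (img2.head?.getD []).length).length := by simpa using hyw
        simp only [List.getElem?_eq_getElem hyr, List.getElem_range, Option.map_some,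
          Option.getD_some]
        split_ifs with h1 h2 <;> first | rfl | (exfalso; omega)
      · have hyr : (List.range (img2.head?.getD []).length).length ≤ y' := by simpa using by omega
        simp only [List.getElem?_eq_none_iff.2 hyr, Option.map_none, Option.getD_none]
        rw [if_neg (by rintro ⟨a, -⟩; omega), if_neg (by rintro ⟨a, -⟩; omega)]
    · have hy2 : (img2[x']'hx).length ≤ y' := by omega
      simp only [pvGet2, nomesralla_alt, List.headD_eq_head?_getD, List.getD_eq_getElem?_getD,
        List.getElem?_map, PySem.List.getElem?_enumerate, List.getElem?_eq_getElem hx,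
        Option.map_some, Option.getD_some, List.getElem?_eq_none_iff.2 hy2,
        Option.map_none, Option.getD_none]
      split <;> rfl
  · have h1 : (nomesralla_alt img2).length ≤ x' := by rw [pvAlt_len]; omega
    have h2 : img2.length ≤ x' := by omega
    simp only [pvGet2, List.getD_eq_getElem?_getD, List.getElem?_eq_none_iff.2 h1,
      List.getElem?_eq_none_iff.2 h2, Option.getD_none]
    split <;> rfl

theorem pvList2_ext (u v : List (List Int)) (h1 : u.length = v.length)
    (h2 : ∀ x', (u.getD x' []).length = (v.getD x' []).length)
    (h3 : ∀ x' y', pvGet2 u x' y' = pvGet2 v x' y') : u = v := by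
  apply List.ext_getElem h1
  intro i hi hi'
  apply List.ext_getElem
  · have := h2 i
    simpa [List.getD_eq_getElem?_getD, List.getElem?_eq_getElem hi,
      List.getElem?_eq_getElem hi'] using this
  · intro j hj hj'
    have := h3 i j
    simpa [pvGet2, List.getD_eq_getElem?_getD, List.getElem?_eq_getElem hi,
      List.getElem?_eq_getElem hi', List.getElem?_eq_getElem hj,
      List.getElem?_eq_getElem hj'] using this

-- ===== VERDICT (by name: the statement is the Claim_ definition above) =====
theorem nomesralla_spec : Claim_equal_nomesralla := by
  intro img2 _ hPre
  unfold Spec_nomesralla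
  obtain ⟨hne, htake⟩ := hPre
  have hrows : ∀ p, p < 2 * (img2.length / 2) →
      (img2.headD []).length ≤ (img2.getD p []).length := by
    intro p hp
    have hpn : p < img2.length := by omega
    have hpt : p < (img2.take (2 * (img2.length / 2))).length := by
      simp [List.length_take]; omega
    have hmem : (img2.take (2 * (img2.length / 2)))[p] ∈ img2.take (2 * (img2.length / 2)) :=
      List.getElem_mem _
    rw [List.getElem_take] at hmem
    have := htake _ hmem
    simpa [List.getD_eq_getElem?_getD, List.getElem?_eq_getElem hpn] using this
  have hlen2n : 2 * (img2.length / 2) ≤ img2.length := by omega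
  -- top pass
  have P1 := pvPass_char ((List.range (img2.length / 2)).reverse) img2 img2
    (List.nodup_reverse.2 (List.nodup_range))
    (fun p _ y' => rfl)
    (fun p hp => by
      have := List.mem_range.1 (List.mem_reverse.1 hp); omega)
    ((img2.headD []).length)
    (fun p hp y' hy => by
      have hpl := List.mem_range.1 (List.mem_reverse.1 hp)
      have := hrows p (by omega); omega)
    ((img2.headD []).length) (le_refl _)
  obtain ⟨hl1, hr1, hc1⟩ := P1
  set img1 := (List.range ((img2.headD []).length)).foldl
      (fun im y => (((List.range (img2.length / 2)).reverse).foldl (pvStepG y) (im, false)).1) img2 with himg1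
  -- bottom pass
  have P2 := pvPass_char (List.range' (img2.length / 2) (img2.length / 2)) img2 img1
    (List.nodup_range')
    (fun p hp y' => by
      have hpr := List.mem_range'_1.1 hp
      rw [hc1 p y']
      rw [if_neg (by
        rintro ⟨_, hm⟩
        obtain ⟨t, h1, h2, _⟩ := (pvMem_ZL_top img2 y' (img2.length / 2) p).1 hm
        omega)])
    (fun p hp => by
      have hpr := List.mem_range'_1.1 hp
      rw [hl1]; omega)
    ((img2.headD []).length)
    (fun p hp y' hy => by
      have hpr := List.mem_range'_1.1 hp
      rw [hr1 p]
      have := hrows p (by omega); omega)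
    ((img2.headD []).length) (le_refl _)
  obtain ⟨hl2, hr2, hc2⟩ := P2
  -- assemble
  rw [pvA_eq]
  apply pvList2_ext
  · rw [hl2, hl1, pvAlt_len]
  · intro x'; rw [hr2, hr1, pvAlt_row]
  · intro x' y'
    rw [hc2 x' y', pvAlt_get]
    have hT : x' ∈ pvZL img2 y' false ((List.range (img2.length / 2)).reverse) ↔
        (x' < img2.length / 2 ∧ x' < pvTop img2 y') := by
      rw [pvMem_ZL_top]
      constructor
      · rintro ⟨t, h1, h2, h3⟩
        exact ⟨by omega, (pvTopVal img2 y' (img2.length / 2) x').2 ⟨t, h1, h2, h3⟩⟩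
      · rintro ⟨_, h⟩
        exact (pvTopVal img2 y' (img2.length / 2) x').1 h
    have hB : x' ∈ pvZL img2 y' false (List.range' (img2.length / 2) (img2.length / 2)) ↔
        (img2.length / 2 ≤ x' ∧ x' < 2 * (img2.length / 2) ∧ pvBot img2 y' < x') := by
      rw [pvMem_ZL_bot]
      have hd : img2.length / 2 + img2.length / 2 = 2 * (img2.length / 2) := by omega
      constructor
      · rintro ⟨t, h1, h2, h3, h4⟩
        have := (pvBotVal img2 y' (img2.length / 2) (img2.length / 2) x').2 ⟨t, h1, h2, h3, h4⟩
        rw [pvBot]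
        refine ⟨by omega, by omega, ?_⟩
        have h5 := this.2
        rw [show img2.length / 2 + img2.length / 2 - 1 = 2 * (img2.length / 2) - 1 from by omega] at h5
        exact h5
      · rintro ⟨h1, h2, h3⟩
        apply (pvBotVal img2 y' (img2.length / 2) (img2.length / 2) x').1
        refine ⟨by omega, ?_⟩
        rw [show img2.length / 2 + img2.length / 2 - 1 = 2 * (img2.length / 2) - 1 from by omega]
        exact h3
    rw [hc1 x' y']
    by_cases hyw : y' < (img2.headD []).length
    · by_cases hbm : x' ∈ pvZL img2 y' false (List.range' (img2.length / 2) (img2.length / 2))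
      · rw [if_pos ⟨hyw, hbm⟩, if_pos ⟨hyw, Or.inr (hB.1 hbm)⟩]
      · rw [if_neg (by rintro ⟨_, h⟩; exact hbm h)]
        by_cases htm : x' ∈ pvZL img2 y' false ((List.range (img2.length / 2)).reverse)
        · rw [if_pos ⟨hyw, htm⟩, if_pos ⟨hyw, Or.inl (hT.1 htm)⟩]
        · rw [if_neg (by rintro ⟨_, h⟩; exact htm h)]
          rw [if_neg (by
            rintro ⟨_, hc | hc⟩
            · exact htm (hT.2 hc)
            · exact hbm (hB.2 hc))]
    · rw [if_neg (fun h => hyw h.1), if_neg (fun h => hyw h.1), if_neg (fun h => hyw h.1)]
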